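-- pv_equiv track=rewrite | github.com/Mercy2Green/m2g_concept_graph | conceptgraph/cg_process/cg_processing.py | find_union_of_viewpoints
-- ===== SOURCE A (Python) =====
-- def find_union_of_viewpoints(viewpoints_a, paths):
--     union_result = set()
--     intersections = []
--     for path in paths:
--         intersection = find_subsequences(viewpoints_a, path)
--         if list(intersection) != []:
--             intersections.append(intersection)
--     # # get the union of all intersections
--     for intersection in intersections:
--         union_result.update(intersection)
--     return union_result
--
-- def get_all_sublists(lst):
--     sublists = []
--     for i in range(len(lst)):
--         for j in range(i+1, len(lst)+1):
--             sublists.append(lst[i:j])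
--     return sublists
--
-- def find_subsequences(lst, target_lst):
--     # lst is the list to search in the target_lst.
--     sublists = get_all_sublists(lst)
--     subsequences = set()
--
--     for subl in sublists:
--         length = len(subl)
--         for i in range(len(target_lst)-length+1):
--             sub_target_lst = tuple(target_lst[i:i+length])
--             if sub_target_lst == tuple(subl):
--                 subsequences.add(sub_target_lst)
--     return subsequences
-- ===== SOURCE B (Python) =====
-- def _sub_tuples(lst):
--     return [tuple(lst[i:j]) for i in range(len(lst)) for j in range(i + 1, len(lst) + 1)]
--
-- def find_union_of_viewpoints(viewpoints_a, paths):
--     subs_a = _sub_tuples(viewpoints_a)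
--     result = set()
--     for path in paths:
--         path_subs = set(_sub_tuples(path))
--         for s in subs_a:
--             if s in path_subs:
--                 result.add(s)
--     return result
-- ===== Notes on version B (the rewrite author's own statement) =====
-- stated objective: faster
-- what changed: Instead of re-enumerating all sublists of viewpoints_a for every path and scanning every position of the path for each sublist, B enumerates the sublists of viewpoints_a once and, per path, builds a hash set of the path's contiguous sub-tuples and answers each sublist by one set-membership test.
import Mathlib
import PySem

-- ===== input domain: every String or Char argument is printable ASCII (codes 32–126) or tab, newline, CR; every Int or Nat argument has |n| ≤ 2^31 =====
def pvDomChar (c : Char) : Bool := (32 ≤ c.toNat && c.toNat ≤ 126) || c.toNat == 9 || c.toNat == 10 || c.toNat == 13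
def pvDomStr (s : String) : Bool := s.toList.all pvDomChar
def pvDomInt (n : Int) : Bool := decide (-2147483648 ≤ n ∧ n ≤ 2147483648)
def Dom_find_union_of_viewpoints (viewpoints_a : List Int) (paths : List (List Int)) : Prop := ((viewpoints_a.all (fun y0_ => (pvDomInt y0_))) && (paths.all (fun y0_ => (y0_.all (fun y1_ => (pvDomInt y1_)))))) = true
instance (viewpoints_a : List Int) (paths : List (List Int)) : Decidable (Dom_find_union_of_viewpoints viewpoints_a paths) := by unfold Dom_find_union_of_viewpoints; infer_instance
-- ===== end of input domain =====

-- B replaces A's per-path re-enumeration of viewpoints_a's sublists and per-sublist scan of the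
-- path by: enumerate the sublists of viewpoints_a once, and per path build a set of the path's
-- contiguous sub-tuples and answer each sublist with one membership test (objective: faster).

-- ===== PORT A =====
def get_all_sublists (lst : List Int) : List (List Int) :=
  (PySem.List.pyRange 0 (PySem.List.len lst) 1).foldl (fun sublists i =>
    (PySem.List.pyRange (i + 1) (PySem.List.len lst + 1) 1).foldl (fun sublists j =>
      sublists ++ [PySem.List.slice lst (some i) (some j)]) sublists) []

def find_subsequences (lst : List Int) (target_lst : List Int) : PySem.Set (List Int) :=
  (get_all_sublists lst).foldl (fun subsequences subl =>
    (PySem.List.pyRange 0 (PySem.List.len target_lst - PySem.List.len subl + 1) 1).foldl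
      (fun subsequences i =>
        let sub_target_lst := PySem.List.slice target_lst (some i) (some (i + PySem.List.len subl))
        if sub_target_lst = subl then PySem.Set.add subsequences sub_target_lst else subsequences)
      subsequences) PySem.Set.empty

def find_union_of_viewpoints (viewpoints_a : List Int) (paths : List (List Int)) : List (List Int) :=
  let intersections := paths.foldl (fun intersections path =>
    let intersection := find_subsequences viewpoints_a path
    if intersection ≠ [] then intersections ++ [intersection] else intersections) []
  intersections.foldl (fun union_result intersection =>
    PySem.Set.update union_result intersection) PySem.Set.empty

-- ===== PORT B =====
def sub_tuples (lst : List Int) : List (List Int) :=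
  (PySem.List.pyRange 0 (PySem.List.len lst) 1).flatMap (fun i =>
    (PySem.List.pyRange (i + 1) (PySem.List.len lst + 1) 1).map (fun j =>
      PySem.List.slice lst (some i) (some j)))

def find_union_of_viewpoints_alt (viewpoints_a : List Int) (paths : List (List Int)) : List (List Int) :=
  let subs_a := sub_tuples viewpoints_a
  paths.foldl (fun result path =>
    let path_subs : PySem.Set (List Int) := PySem.Set.ofList (sub_tuples path)
    subs_a.foldl (fun result s =>
      if PySem.Set.contains path_subs s then PySem.Set.add result s else result) result)
    PySem.Set.empty

-- ===== PRECONDITION & SPEC =====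
def Spec_find_union_of_viewpoints (viewpoints_a : List Int) (paths : List (List Int)) (out : List (List Int)) : Prop := out = find_union_of_viewpoints_alt viewpoints_a paths
instance (viewpoints_a : List Int) (paths : List (List Int)) (out : List (List Int)) : Decidable (Spec_find_union_of_viewpoints viewpoints_a paths out) := by unfold Spec_find_union_of_viewpoints; infer_instance

-- ===== CLAIM (what is proved, stated in full; the proofs are below) =====
def Claim_equal_find_union_of_viewpoints : Prop := ∀ (viewpoints_a : List Int) (paths : List (List Int)), Dom_find_union_of_viewpoints viewpoints_a paths → Spec_find_union_of_viewpoints viewpoints_a paths (find_union_of_viewpoints viewpoints_a paths)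

-- ===== LEMMAS AND PROOFS =====

-- A's sublist enumeration equals B's comprehension.
theorem get_all_sublists_eq (lst : List Int) : get_all_sublists lst = sub_tuples lst := by
  unfold get_all_sublists sub_tuples
  rw [PySem.List.foldl_congr_mem _ _
    (fun sublists i => sublists ++
      (PySem.List.pyRange (i + 1) (PySem.List.len lst + 1) 1).map
        (fun j => PySem.List.slice lst (some i) (some j))) _
    (fun acc i _ => PySem.List.foldl_append_singleton_eq_map _ _ acc),
    PySem.List.foldl_append_eq_flatMap, List.nil_append]

-- membership in sub_tuples
theorem mem_sub_tuples {lst x : List Int} :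
    x ∈ sub_tuples lst ↔ ∃ i j : Int, 0 ≤ i ∧ i + 1 ≤ j ∧ j ≤ (lst.length : Int) ∧
      PySem.List.slice lst (some i) (some j) = x := by
  unfold sub_tuples
  simp only [List.mem_flatMap, List.mem_map, PySem.List.mem_pyRange_one, PySem.List.len_eq]
  constructor
  · rintro ⟨i, ⟨hi0, hil⟩, j, ⟨hj1, hj2⟩, hx⟩
    exact ⟨i, j, hi0, hj1, by omega, hx⟩
  · rintro ⟨i, j, hi0, hj1, hj2, hx⟩
    exact ⟨i, ⟨hi0, by omega⟩, j, ⟨hj1, by omega⟩, hx⟩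

-- members of sub_tuples are nonempty
theorem ne_nil_of_mem_sub_tuples {lst x : List Int} (h : x ∈ sub_tuples lst) : x ≠ [] := by
  rcases mem_sub_tuples.mp h with ⟨i, j, hi0, hj1, hj2, hx⟩
  rw [PySem.List.slice_of_nonneg lst hi0 (by omega) (by omega) hj2] at hx
  intro hnil
  rw [hnil] at hx
  have := congrArg List.length hx
  simp only [List.length_take, List.length_drop, List.length_nil] at this
  omega

-- length of a slice member determines its right end
theorem slice_length_eq {lst x : List Int} {i j : Int} (hi0 : 0 ≤ i) (hij : i ≤ j)
    (hj : j ≤ (lst.length : Int)) (hx : PySem.List.slice lst (some i) (some j) = x) :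
    (x.length : Int) = j - i := by
  rw [PySem.List.slice_of_nonneg lst hi0 (by omega) (by omega) hj] at hx
  have := congrArg List.length hx
  simp only [List.length_take, List.length_drop] at this
  omega

-- a conditional-add scan over any index list adds subl exactly when some position matches
theorem foldl_match (target subl : List Int) (is : List Int) (s : PySem.Set (List Int)) :
    is.foldl (fun subsequences i =>
        if PySem.List.slice target (some i) (some (i + PySem.List.len subl)) = subl
        then PySem.Set.add subsequences
          (PySem.List.slice target (some i) (some (i + PySem.List.len subl)))
        else subsequences) s
    = if ∃ i ∈ is, PySem.List.slice target (some i) (some (i + PySem.List.len subl)) = subl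
      then PySem.Set.add s subl else s := by
  induction is generalizing s with
  | nil => simp
  | cons a is ih =>
      simp only [List.foldl_cons]
      by_cases ha : PySem.List.slice target (some a) (some (a + PySem.List.len subl)) = subl
      · rw [if_pos ha, ha, ih, if_pos (show ∃ i ∈ a :: is,
            PySem.List.slice target (some i) (some (i + PySem.List.len subl)) = subl from
            ⟨a, List.mem_cons_self, ha⟩)]
        split_ifs with h2
        · exact PySem.Set.add_of_mem ((PySem.Set.mem_add _ _ _).mpr (Or.inr rfl))
        · rfl
      · rw [if_neg ha, ih]
        by_cases h2 : ∃ i ∈ is,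
            PySem.List.slice target (some i) (some (i + PySem.List.len subl)) = subl
        · rcases h2 with ⟨i, hi, hslice⟩
          rw [if_pos ⟨i, hi, hslice⟩, if_pos ⟨i, List.mem_cons_of_mem _ hi, hslice⟩]
        · rw [if_neg h2, if_neg (by
            rintro ⟨i, hi, hs⟩
            rcases List.mem_cons.mp hi with rfl | hi
            exacts [ha hs, h2 ⟨i, hi, hs⟩])]

-- A's inner position scan, as an add-if-member step (subl nonempty)
theorem inner_scan_eq (target subl : List Int) (hne : subl ≠ [])
    (s : PySem.Set (List Int)) :
    (PySem.List.pyRange 0 (PySem.List.len target - PySem.List.len subl + 1) 1).foldl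
      (fun subsequences i =>
        if PySem.List.slice target (some i) (some (i + PySem.List.len subl)) = subl
        then PySem.Set.add subsequences
          (PySem.List.slice target (some i) (some (i + PySem.List.len subl)))
        else subsequences)
      s
    = if PySem.Set.contains (PySem.Set.ofList (sub_tuples target)) subl
      then PySem.Set.add s subl else s := by
  have hiff : (∃ i ∈ PySem.List.pyRange 0 (PySem.List.len target - PySem.List.len subl + 1) 1,
      PySem.List.slice target (some i) (some (i + PySem.List.len subl)) = subl)
      ↔ subl ∈ sub_tuples target := by
    have hL : 0 < subl.length := List.length_pos_of_ne_nil hne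
    simp only [PySem.List.mem_pyRange_one, PySem.List.len_eq]
    constructor
    · rintro ⟨i, ⟨hi0, hilt⟩, hs⟩
      exact mem_sub_tuples.mpr ⟨i, i + (subl.length : Int), hi0, by omega, by omega, hs⟩
    · intro h
      rcases mem_sub_tuples.mp h with ⟨i, j, hi0, hj1, hj2, hs⟩
      have hlen := slice_length_eq hi0 (by omega) hj2 hs
      have hj : j = i + (subl.length : Int) := by omega
      exact ⟨i, ⟨hi0, by omega⟩, by rw [← hj]; exact hs⟩
  rw [foldl_match]
  by_cases hm : subl ∈ sub_tuples target
  · rw [if_pos (hiff.mpr hm),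
      if_pos ((PySem.Set.contains_iff _ _).mpr ((PySem.Set.mem_ofList _ _).mpr hm))]
  · rw [if_neg (fun h => hm (hiff.mp h)),
      if_neg (fun h => hm ((PySem.Set.mem_ofList _ _).mp ((PySem.Set.contains_iff _ _).mp h)))]

-- update with a conditional-add fold commutes to folding from the updated state
theorem update_foldl_addIf (c : List Int → Bool) (l : List (List Int))
    (u t : PySem.Set (List Int)) :
    PySem.Set.update u (l.foldl (fun r x => if c x then PySem.Set.add r x else r) t)
      = l.foldl (fun r x => if c x then PySem.Set.add r x else r) (PySem.Set.update u t) := by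
  induction l generalizing t with
  | nil => rfl
  | cons x xs ih =>
      simp only [List.foldl_cons, ih]
      congr 1
      by_cases hc : c x
      · rw [if_pos hc, if_pos hc]
        by_cases hm : x ∈ t
        · rw [PySem.Set.add_of_mem hm, PySem.Set.add_of_mem (by
            rw [PySem.Set.mem_update]; exact Or.inr hm)]
        · rw [PySem.Set.add_of_not_mem hm, PySem.Set.update_append,
            PySem.Set.update_cons, PySem.Set.update_nil]
      · rw [if_neg hc, if_neg hc]

-- find_subsequences as a single conditional-add fold over sub_tuples
theorem find_subsequences_eq (lst target : List Int) :
    find_subsequences lst target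
      = (sub_tuples lst).foldl (fun r x =>
          if PySem.Set.contains (PySem.Set.ofList (sub_tuples target)) x
          then PySem.Set.add r x else r) PySem.Set.empty := by
  unfold find_subsequences
  rw [get_all_sublists_eq]
  exact PySem.List.foldl_congr_mem _ _ _ _
    (fun acc x hx => inner_scan_eq target x (ne_nil_of_mem_sub_tuples hx) acc)

-- A's outer skip-empty accumulation folds as a direct per-path update
theorem intersections_fold (F : List Int → PySem.Set (List Int)) (paths : List (List Int))
    (acc0 : List (PySem.Set (List Int))) (u : PySem.Set (List Int)) :
    (paths.foldl (fun acc path =>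
        if F path ≠ [] then acc ++ [F path] else acc) acc0).foldl
      (fun union_result intersection => PySem.Set.update union_result intersection) u
    = paths.foldl (fun r path => PySem.Set.update r (F path))
        (acc0.foldl (fun union_result intersection =>
          PySem.Set.update union_result intersection) u) := by
  induction paths generalizing acc0 with
  | nil => rfl
  | cons p ps ih =>
      simp only [List.foldl_cons, ih]
      congr 1
      by_cases h : F p = []
      · rw [if_neg (by simp [h]), h, PySem.Set.update_nil]
      · rw [if_pos h, List.foldl_append, List.foldl_cons, List.foldl_nil]

-- ===== VERDICT (by name: the statement is the Claim_ definition above) =====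
theorem find_union_of_viewpoints_spec : Claim_equal_find_union_of_viewpoints := by
  intro viewpoints_a paths _
  unfold Spec_find_union_of_viewpoints
  simp only [find_union_of_viewpoints, find_union_of_viewpoints_alt]
  rw [intersections_fold (find_subsequences viewpoints_a) paths [] PySem.Set.empty]
  simp only [List.foldl_nil]
  refine PySem.List.foldl_congr_mem _ _ _ _ (fun u path _ => ?_)
  rw [find_subsequences_eq]
  exact update_foldl_addIf _ _ u PySem.Set.empty
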